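-- pv_equiv track=rewrite | github.com/Andrew17721/automata_practical_exam_-4448- | PDA.py | is_odd_palindrome
-- ===== SOURCE A (Python) =====
-- def is_odd_palindrome(string: str) -> bool:
--     n = len(string)
--     if n % 2 == 0:
--         return False
--
--     stack = []
--     mid = n // 2
--
--     for i in range(mid):
--         stack.append(string[i])
--
--     for i in range(mid + 1, n):
--         if not stack or string[i] != stack.pop():
--             return False
--
--     return True
-- ===== SOURCE B (Python) =====
-- def is_odd_palindrome(string: str) -> bool:
--     return len(string) % 2 == 1 and string == string[::-1]
-- ===== Notes on version B (the rewrite author's own statement) =====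
-- stated objective: simpler
-- what changed: Replaces the two explicit loops maintaining a push/pop stack with a direct parity test plus a single whole-string reverse-and-compare.
import Mathlib
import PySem

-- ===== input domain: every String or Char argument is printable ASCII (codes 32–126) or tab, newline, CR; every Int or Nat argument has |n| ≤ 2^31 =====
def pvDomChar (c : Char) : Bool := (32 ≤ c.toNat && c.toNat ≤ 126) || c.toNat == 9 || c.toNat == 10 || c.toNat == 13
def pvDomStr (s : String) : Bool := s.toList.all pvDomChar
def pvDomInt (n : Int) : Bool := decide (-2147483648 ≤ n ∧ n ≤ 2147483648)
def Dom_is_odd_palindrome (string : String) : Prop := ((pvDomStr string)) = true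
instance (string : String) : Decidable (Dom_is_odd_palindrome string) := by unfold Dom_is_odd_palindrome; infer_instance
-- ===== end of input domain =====

-- B replaces A's two explicit stack loops by a parity test plus one whole-string reverse-and-compare (simpler).

-- ===== PORT A =====
-- second loop of A: for i in range(mid+1, n): if not stack or string[i] != stack.pop(): return False
-- (stack.pop() removes the LAST element, so the port reads getLast and keeps dropLast)
def pvLoop2 (l : List Char) (idxs : List Int) (stack : List Char) : Bool :=
  match idxs with
  | [] => true
  | i :: rest =>
    if h : stack = [] then false
    else if PySem.List.pyGetD l i ' ' ≠ stack.getLast h then false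
    else pvLoop2 l rest stack.dropLast

def is_odd_palindrome (string : String) : Bool :=
  let l := string.toList
  let n : Int := l.length
  if n % 2 == 0 then false
  else
    let mid := PySem.Int.floordiv n 2
    -- for i in range(mid): stack.append(string[i])
    let stack := (PySem.List.pyRange 0 mid 1).foldl (fun st i => st ++ [PySem.List.pyGetD l i ' ']) []
    pvLoop2 l (PySem.List.pyRange (mid + 1) n 1) stack

-- ===== PORT B =====
-- return len(string) % 2 == 1 and string == string[::-1]
def is_odd_palindrome_alt (string : String) : Bool :=
  let l := string.toList
  l.length % 2 == 1 && l == l.reverse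

-- ===== PRECONDITION & SPEC =====
def Spec_is_odd_palindrome (string : String) (out : Bool) : Prop := out = is_odd_palindrome_alt string
instance (string : String) (out : Bool) : Decidable (Spec_is_odd_palindrome string out) := by unfold Spec_is_odd_palindrome; infer_instance

-- ===== CLAIM (what is proved, stated in full; the proofs are below) =====
def Claim_equal_is_odd_palindrome : Prop := ∀ (string : String), Dom_is_odd_palindrome string → Spec_is_odd_palindrome string (is_odd_palindrome string)

-- ===== LEMMAS AND PROOFS =====

theorem pvLoop2_true_iff (l : List Char) (idxs : List Int) (stack : List Char)
    (hlen : idxs.length = stack.length) :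
    (pvLoop2 l idxs stack = true ↔ idxs.map (fun i => PySem.List.pyGetD l i ' ') = stack.reverse) := by
  induction idxs generalizing stack with
  | nil =>
    have : stack = [] := by simpa using (List.length_eq_zero_iff).1 hlen.symm
    subst this; simp [pvLoop2]
  | cons i rest ih =>
    have hne : stack ≠ [] := by
      intro h; subst h; simp at hlen
    have hsplit : stack.dropLast ++ [stack.getLast hne] = stack := List.dropLast_append_getLast hne
    have hrev : stack.reverse = stack.getLast hne :: stack.dropLast.reverse := by
      conv_lhs => rw [← hsplit]
      simp
    have hlen' : rest.length = stack.dropLast.length := by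
      have := congrArg List.length hsplit
      simp at this ⊢
      simp at hlen
      omega
    rw [pvLoop2]
    simp only [dif_neg hne]
    by_cases hc : PySem.List.pyGetD l i ' ' = stack.getLast hne
    · simp only [hc, ne_eq, not_true_eq_false, if_false, List.map_cons, hrev, ih _ hlen']
      constructor <;> intro h <;> simp_all
    · simp only [ne_eq, hc, not_false_eq_true, if_true, List.map_cons, hrev]
      constructor <;> intro h <;> simp_all

theorem pvTakeMap (l : List Char) (m : Nat) (hm : m ≤ l.length) :
    (List.range m).map (fun k => l.getD k ' ') = l.take m := by
  apply List.ext_getElem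
  · simp [hm]
  · intro k h1 h2
    simp at h1 h2 ⊢
    rw [List.getElem?_eq_getElem (by omega)]
    rfl

theorem pvDropMap (l : List Char) (m : Nat) (hlen : l.length = 2*m+1) :
    (PySem.List.pyRange ((m:Int)+1) (l.length:Int)).map (fun i => PySem.List.pyGetD l i ' ') = l.drop (m+1) := by
  rw [PySem.List.pyRange_one, List.map_map]
  have ht : (((l.length:Int)) - ((m:Int)+1)).toNat = m := by omega
  rw [ht]
  apply List.ext_getElem
  · simp; omega
  · intro k h1 h2
    simp at h1 h2 ⊢
    have : (m:Int) + 1 + (k:Int) = ((m+1+k : Nat) : Int) := by push_cast; ring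
    rw [this, PySem.List.pyGetD_natCast, List.getD_eq_getElem l ' ' (by omega)]

theorem pvHalfIff (l : List Char) (m : Nat) (hlen : l.length = 2*m+1) :
    (l.drop (m+1) = (l.take m).reverse) ↔ l = l.reverse := by
  have hm : m < l.length := by omega
  have hsplit : l = l.take m ++ l[m] :: l.drop (m+1) := by
    conv_lhs => rw [← List.take_append_drop m l]
    rw [List.drop_eq_getElem_cons hm]
  have hrev : l.reverse = (l.drop (m+1)).reverse ++ l[m] :: (l.take m).reverse := by
    conv_lhs => rw [hsplit]
    simp
  constructor
  · intro h
    rw [hrev, h]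
    conv_lhs => rw [hsplit, h]
    simp
  · intro h
    have h2 : l.take m ++ l[m] :: l.drop (m+1) = (l.drop (m+1)).reverse ++ l[m] :: (l.take m).reverse := by
      conv_lhs => rw [← hsplit, h, hsplit]
      simp
    have hl : (l.take m).length = ((l.drop (m+1)).reverse).length := by simp; omega
    obtain ⟨h3, h4⟩ := List.append_inj h2 (by simpa using hl)
    have := congrArg List.reverse h3
    simp at this
    exact this.symm

theorem main_eq (s : String) : is_odd_palindrome s = is_odd_palindrome_alt s := by
  simp only [is_odd_palindrome, is_odd_palindrome_alt]
  generalize s.toList = l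
  by_cases hp : l.length % 2 = 0
  · have hA : (((l.length : Int)) % 2 == 0) = true := by rw [beq_iff_eq]; omega
    have hB : (l.length % 2 == 1) = false := by rw [beq_eq_false_iff_ne]; omega
    simp only [hA, hB, if_true, Bool.false_and]
  · obtain ⟨m, hm⟩ : ∃ m, l.length = 2*m+1 := ⟨l.length/2, by omega⟩
    have hA : (((l.length : Int)) % 2 == 0) = false := by
      rw [beq_eq_false_iff_ne]; omega
    have hB : (l.length % 2 == 1) = true := by rw [beq_iff_eq]; omega
    simp only [hA, hB, Bool.false_eq_true, if_false, Bool.true_and]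
    have hmid : PySem.Int.floordiv ((l.length : Int)) 2 = (m:Int) := by
      have := PySem.Int.floordiv_natCast l.length 2
      rw [show ((2:Int)) = ((2:Nat):Int) from rfl, this]
      omega
    rw [hmid]
    have hstack : (PySem.List.pyRange 0 (m:Int) 1).foldl
        (fun st i => st ++ [PySem.List.pyGetD l i ' ']) [] = l.take m := by
      rw [PySem.List.foldl_append_singleton_eq_map, List.nil_append]
      rw [show PySem.List.pyRange 0 (m:Int) 1 = PySem.List.pyRange 0 (m:Int) from rfl]
      rw [PySem.List.pyRange_zero_natCast, List.map_map]
      simp only [Function.comp_def, PySem.List.pyGetD_natCast]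
      exact pvTakeMap l m (by omega)
    rw [hstack]
    have hlen2 : (PySem.List.pyRange ((m:Int) + 1) ((l.length : Int)) 1).length
        = (l.take m).length := by
      rw [show PySem.List.pyRange ((m:Int)+1) ((l.length : Int)) 1
            = PySem.List.pyRange ((m:Int)+1) ((l.length : Int)) from rfl]
      rw [PySem.List.pyRange_one]
      simp
      omega
    have hiff := pvLoop2_true_iff l _ _ hlen2
    rw [show PySem.List.pyRange ((m:Int)+1) ((l.length : Int)) 1
          = PySem.List.pyRange ((m:Int)+1) ((l.length : Int)) from rfl] at hiff ⊢
    rw [pvDropMap l m hm] at hiff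
    rw [pvHalfIff l m hm] at hiff
    rw [Bool.eq_iff_iff, hiff, beq_iff_eq]

-- ===== VERDICT (by name: the statement is the Claim_ definition above) =====
theorem is_odd_palindrome_spec : Claim_equal_is_odd_palindrome := by
  intro s _
  unfold Spec_is_odd_palindrome
  exact main_eq s
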